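-- pv_equiv track=rewrite | github.com/TanjaArsic/AI | idegas4ujutru.py | get_undirected_graph
-- ===== SOURCE A (Python) =====
-- import queue
--
-- def get_undirected_graph(graph, start): #breadth_first_search
--     new_graph= dict() #value je tuple (heuristika,susedi)
--     queue_nodes= queue.Queue(len(graph))
--     visited= set() #pravi se skup da se oznace poseceni cvorovi
--     prev_nodes= dict() #value je lista tupleova, prethodnici (heur,prethodnik)
--     prev_nodes[start]= None #prvi cvor nema prethodnike
--     done_nodes=list()
--
--     done_nodes.append(start)
--     new_graph[start]=(0,graph[start]) #heuristika za START je 0, susedi su D i H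
--     visited.add(start)
--     queue_nodes.put(start)
--
--     while not queue_nodes.empty():
--         node= queue_nodes.get()
--         #nadji minimum i dodaj u novi graf
--         if node is not start:
--             heuristic= min(list(map(lambda x: x[0], prev_nodes[node])))+1 #nalazi minimalnu heuristiku?
--             new_graph[node]=(heuristic, graph[node])
--         for neighb in graph[node]:
--             if neighb not in visited:
--                 visited.add(neighb)
--                 queue_nodes.put(neighb)
--
--             if neighb not in done_nodes:#nije moralo, ali da se ne bi dodavali susedi i nakon sto se cvor obradi
--                 if neighb in prev_nodes:
--                     prev_nodes[neighb].append((new_graph[node][0],node))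
--                 else:
--                     prev_nodes[neighb]=[(new_graph[node][0],node)]
--     return new_graph
-- ===== SOURCE B (Python) =====
-- def get_undirected_graph(graph, start):  # breadth_first_search
--     # BFS with a direct discovery-distance table: dist[n] is set once, when n
--     # is first seen, to dist[parent]+1; this equals A's min-over-predecessors
--     # heuristic because BFS processes nodes in nondecreasing level order.
--     new_graph = {start: (0, graph[start])}
--     dist = {start: 0}
--     order = [start]
--     i = 0
--     while i < len(order):
--         node = order[i]
--         i += 1
--         new_graph[node] = (dist[node], graph[node])
--         for neighb in graph[node]:
--             if neighb not in dist:
--                 dist[neighb] = dist[node] + 1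
--                 order.append(neighb)
--     return new_graph
-- ===== Notes on version B (the rewrite author's own statement) =====
-- stated objective: simpler
-- what changed: Replaces A's predecessor-list dict and min-of-predecessors+1 computation at each dequeue with a plain BFS that assigns each node its discovery distance once (dist[parent]+1) when it is first seen, dropping the prev_nodes/done_nodes/visited bookkeeping and the bounded queue.Queue.
import Mathlib
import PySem

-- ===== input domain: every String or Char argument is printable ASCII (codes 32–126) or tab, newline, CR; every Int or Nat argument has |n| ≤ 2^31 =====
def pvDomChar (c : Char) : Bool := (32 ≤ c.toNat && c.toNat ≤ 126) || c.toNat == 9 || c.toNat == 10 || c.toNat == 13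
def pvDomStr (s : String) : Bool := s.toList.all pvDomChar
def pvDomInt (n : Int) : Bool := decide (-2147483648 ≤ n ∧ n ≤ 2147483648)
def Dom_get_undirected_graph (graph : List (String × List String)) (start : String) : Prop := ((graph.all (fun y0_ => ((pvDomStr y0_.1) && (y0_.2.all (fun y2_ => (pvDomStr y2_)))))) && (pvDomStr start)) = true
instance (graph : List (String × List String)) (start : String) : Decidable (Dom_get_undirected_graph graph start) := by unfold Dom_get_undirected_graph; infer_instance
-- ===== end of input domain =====

-- B replaces A's predecessor-list accumulation + min-of-predecessors heuristic by a plain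
-- BFS discovery-distance table (objective: simpler).

-- Upper bound on the number of loop iterations of either BFS while-loop (every enqueue
-- after the initial one consumes one distinct neighbour-list occurrence), used as fuel:
-- with this fuel both loops run to queue exhaustion, so the ports are exact.
def pvLoopBound (graph : List (String × List String)) : Nat :=
  (graph.map (fun p => p.2.length)).sum + 1

-- ===== PORT A =====
-- one iteration of A's inner 'for neighb in graph[node]' loop; state = (queue, visited, prev_nodes).
-- prev_nodes[neighb].append(x) / prev_nodes[neighb]=[x] are together Dict.modify with default [];
-- A's prev_nodes[start]=None entry is never read nor appended to (start ∈ done_nodes), so it is not modelled.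
def aStep (node : String) (done : List String)
    (ng : PySem.Dict String (Int × List String))
    (s : List String × PySem.Set String × PySem.Dict String (List (Int × String)))
    (nb : String) :
    List String × PySem.Set String × PySem.Dict String (List (Int × String)) :=
  let q := s.1
  let vis := s.2.1
  let prev := s.2.2
  let vis' := if PySem.Set.contains vis nb then vis else PySem.Set.add vis nb
  let q' := if PySem.Set.contains vis nb then q else q ++ [nb]
  let prev' := if nb ∈ done then prev
    else prev.modify nb [] (fun l => l ++ [((ng.getD node (0, [])).1, node)])
  (q', vis', prev')

-- A's 'while not queue_nodes.empty()' loop. min(list) of an empty list raises ValueError in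
-- Python but is unreachable for A (every enqueued non-start node has a predecessor entry);
-- the .getD 0 default is dead code. Missing graph[node] (Python KeyError) is excluded by Pre_.
def aLoop (g : List (String × List String)) (start : String) :
    Nat → List String → PySem.Set String → PySem.Dict String (List (Int × String)) →
    List String → PySem.Dict String (Int × List String) → PySem.Dict String (Int × List String)
  | 0, _, _, _, _, ng => ng
  | _ + 1, [], _, _, _, ng => ng
  | fuel + 1, node :: q, vis, prev, done, ng =>
      let ng' := if node ≠ start then
          ng.insert node
            (((PySem.List.min? ((prev.getD node []).map (fun e => e.1)) (fun x => x)).getD 0) + 1,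
              (g.lookup node).getD [])
        else ng
      let s := ((g.lookup node).getD []).foldl (aStep node done ng') (q, vis, prev)
      aLoop g start fuel s.1 s.2.1 s.2.2 done ng'

def get_undirected_graph (graph : List (String × List String)) (start : String) :
    List (String × Int × List String) :=
  match graph.lookup start with
  | none => []          -- Python: KeyError on graph[start]; excluded by Pre_
  | some ns =>
      let ng := PySem.Dict.empty.insert start ((0 : Int), ns)
      let vis := PySem.Set.add PySem.Set.empty start
      (aLoop graph start (pvLoopBound graph) [start] vis PySem.Dict.empty [start] ng).items

-- ===== PORT B =====
-- one iteration of B's 'for neighb in graph[node]' loop; state = (pending tail of order, dist).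
def bStep (node : String) (s : List String × PySem.Dict String Int) (nb : String) :
    List String × PySem.Dict String Int :=
  if s.2.contains nb then s else (s.1 ++ [nb], s.2.insert nb (s.2.getD node 0 + 1))

-- B's 'while i < len(order)' loop: order = processed ++ pending, recursing on pending.
def bLoop (g : List (String × List String)) :
    Nat → List String → PySem.Dict String Int →
    PySem.Dict String (Int × List String) → PySem.Dict String (Int × List String)
  | 0, _, _, ng => ng
  | _ + 1, [], _, ng => ng
  | fuel + 1, node :: q, dist, ng =>
      let ng' := ng.insert node (dist.getD node 0, (g.lookup node).getD [])
      let s := ((g.lookup node).getD []).foldl (bStep node) (q, dist)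
      bLoop g fuel s.1 s.2 ng'

def get_undirected_graph_alt (graph : List (String × List String)) (start : String) :
    List (String × Int × List String) :=
  match graph.lookup start with
  | none => []          -- Python: KeyError on graph[start]; excluded by Pre_
  | some ns =>
      (bLoop graph (pvLoopBound graph) [start] (PySem.Dict.empty.insert start 0)
        (PySem.Dict.empty.insert start ((0 : Int), ns))).items

-- ===== PRECONDITION & SPEC =====
-- one closure step: add the neighbours of every current member that is a key
def reachStep (g : List (String × List String)) (S : PySem.Set String) : PySem.Set String :=
  S.foldl (fun acc n => PySem.Set.update acc ((g.lookup n).getD [])) S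

-- all nodes reachable from start (a path leaves only key nodes, so depth ≤ g.length suffices)
def reachClosure (g : List (String × List String)) (start : String) : List String :=
  (reachStep g)^[g.length + 1] (PySem.Set.ofList [start])

-- Pre_ excludes exactly the inputs on which Python A does not return: if some node reachable
-- from start (including start itself) is not a key of graph, A either raises KeyError or
-- blocks forever on its bounded queue.Queue.
def Pre_get_undirected_graph (graph : List (String × List String)) (start : String) : Prop :=
  ∀ n ∈ reachClosure graph start, (graph.lookup n).isSome = true
instance (graph : List (String × List String)) (start : String) :
    Decidable (Pre_get_undirected_graph graph start) := by
  unfold Pre_get_undirected_graph; infer_instance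

def pvWitness_get_undirected_graph : (List (String × List String)) × String :=
  ([("a", ["b", "a"]), ("b", ["a"]), ("c", ["d"])], "a")

def Spec_get_undirected_graph (graph : List (String × List String)) (start : String) (out : List (String × Int × List String)) : Prop := out = get_undirected_graph_alt graph start
instance (graph : List (String × List String)) (start : String) (out : List (String × Int × List String)) : Decidable (Spec_get_undirected_graph graph start out) := by unfold Spec_get_undirected_graph; infer_instance

-- ===== CLAIM (what is proved, stated in full; the proofs are below) =====
def Claim_equal_get_undirected_graph : Prop := ∀ (graph : List (String × List String)) (start : String), Dom_get_undirected_graph graph start → Pre_get_undirected_graph graph start → Spec_get_undirected_graph graph start (get_undirected_graph graph start)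

-- ===== LEMMAS AND PROOFS =====

-- items of d.insert k v are unchanged when d already maps k to v
theorem pv_insert_self_eq {ν : Type} (d : PySem.Dict String ν) (k : String) (v : ν)
    (hnd : d.keys.Nodup) (h : d.get? k = some v) : d.insert k v = d := by
  apply PySem.Dict.ext
  have hc : d.contains k = true := by
    rw [PySem.Dict.contains_eq_isSome_get?, h]; rfl
  rw [PySem.Dict.items_insert_of_contains d v hc]
  conv_rhs => rw [← List.map_id d.items]
  apply List.map_congr_left
  intro p hp
  by_cases hk : p.1 = k
  · have hm : (k, p.2) ∈ d.items := by rw [← hk]; simp; exact hp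
    have hv : d.get? k = some p.2 := PySem.Dict.get?_of_mem_items d hm hnd
    rw [h] at hv
    simp only [hk, beq_self_eq_true, if_true, id]
    rw [← hk, Option.some_inj.mp hv]
  · simp [hk]

-- Set.contains on a dict's key list is the dict's contains
theorem pv_set_dict_contains (d : PySem.Dict String Int) (x : String) :
    PySem.Set.contains d.keys x = d.contains x := by
  rw [PySem.Dict.contains_eq_decide_mem_keys]
  exact Bool.eq_iff_iff.2 (by simp)

theorem pv_set_add_of_not_mem (s : PySem.Set String) (x : String) (h : x ∉ s) :
    PySem.Set.add s x = s ++ [x] := by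
  simp [PySem.Set.add, h]

-- The coupling invariant between A's loop state (q, vis, prev, ng) and B's (q, dist, ng):
-- same queue, same new_graph dict; vis is exactly dist's key list; every queued node has a
-- dist entry; every queued non-start node's predecessor list has minimum dist[n]-1; queue
-- dist values form two consecutive BFS levels.
structure BfsInv (g : List (String × List String)) (start : String)
    (q : List String) (vis : PySem.Set String)
    (prev : PySem.Dict String (List (Int × String)))
    (ng : PySem.Dict String (Int × List String))
    (dist : PySem.Dict String Int) : Prop where
  hvis : vis = dist.keys
  hdk : dist.keys.Nodup
  hs_con : dist.contains start = true
  hs_d : dist.getD start 0 = 0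
  hng_s : ng.get? start = some (0, (g.lookup start).getD [])
  hng_nd : ng.keys.Nodup
  hq_mem : ∀ n ∈ q, dist.contains n = true
  hq_prev : ∀ n ∈ q, n ≠ start →
    (prev.getD n [] ≠ [] ∧ (∀ e ∈ prev.getD n [], dist.getD n 0 - 1 ≤ e.1) ∧
      (∃ e ∈ prev.getD n [], e.1 = dist.getD n 0 - 1))
  hfresh : ∀ n, dist.contains n = false → prev.getD n [] = []
  hlev : ∃ L a b, q.map (fun n => dist.getD n 0) = List.replicate a L ++ List.replicate b (L + 1)

-- the invariant holding during the inner neighbour fold of the node being processed,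
-- with the processed node's level L pinned
structure MidInv (g : List (String × List String)) (start node : String) (L : Int)
    (q : List String) (vis : PySem.Set String)
    (prev : PySem.Dict String (List (Int × String)))
    (ng : PySem.Dict String (Int × List String))
    (dist : PySem.Dict String Int) : Prop where
  m_vis : vis = dist.keys
  m_dk : dist.keys.Nodup
  m_scon : dist.contains start = true
  m_sd : dist.getD start 0 = 0
  m_ncon : dist.contains node = true
  m_nd : dist.getD node 0 = L
  m_ng : (ng.getD node (0, [])).1 = L
  m_qmem : ∀ n ∈ q, dist.contains n = true
  m_qprev : ∀ n ∈ q, n ≠ start →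
    (prev.getD n [] ≠ [] ∧ (∀ e ∈ prev.getD n [], dist.getD n 0 - 1 ≤ e.1) ∧
      (∃ e ∈ prev.getD n [], e.1 = dist.getD n 0 - 1))
  m_fresh : ∀ n, dist.contains n = false → prev.getD n [] = []
  m_lev : ∃ a b, q.map (fun n => dist.getD n 0) = List.replicate a L ++ List.replicate b (L + 1)

-- one neighbour step preserves the coupling
theorem pv_step_pres (g : List (String × List String)) (start node : String) (L : Int)
    (q : List String) (vis : PySem.Set String)
    (prev : PySem.Dict String (List (Int × String)))
    (ng : PySem.Dict String (Int × List String)) (dist : PySem.Dict String Int)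
    (nb : String) (h : MidInv g start node L q vis prev ng dist) :
    (aStep node [start] ng (q, vis, prev) nb).1 = (bStep node (q, dist) nb).1 ∧
    MidInv g start node L (aStep node [start] ng (q, vis, prev) nb).1
      (aStep node [start] ng (q, vis, prev) nb).2.1
      (aStep node [start] ng (q, vis, prev) nb).2.2 ng (bStep node (q, dist) nb).2 := by
  have hset : PySem.Set.contains vis nb = dist.contains nb := by
    rw [h.m_vis]; exact pv_set_dict_contains dist nb
  by_cases hc : dist.contains nb = true
  · -- nb already visited: queues and dist unchanged; A may append a predecessor entry
    simp only [aStep, bStep, hset, hc, if_true]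
    by_cases hsb : nb = start
    · simp only [hsb, List.mem_singleton]
      exact ⟨trivial, h⟩
    · simp only [List.mem_singleton, if_neg hsb]
      refine ⟨trivial, ?_⟩
      have hlevmem : ∀ n ∈ q, dist.getD n 0 = L ∨ dist.getD n 0 = L + 1 := by
        intro n hn
        obtain ⟨a, b, hm⟩ := h.m_lev
        have : dist.getD n 0 ∈ (q.map (fun n => dist.getD n 0)) := List.mem_map_of_mem hn
        rw [hm] at this
        rcases List.mem_append.1 this with h' | h'
        · exact Or.inl (List.eq_of_mem_replicate h')
        · exact Or.inr (List.eq_of_mem_replicate h')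
      refine ⟨h.m_vis, h.m_dk, h.m_scon, h.m_sd, h.m_ncon, h.m_nd, h.m_ng, h.m_qmem, ?_, ?_, h.m_lev⟩
      · intro n hn hns
        obtain ⟨h1, h2, h3⟩ := h.m_qprev n hn hns
        rw [PySem.Dict.getD_modify]
        by_cases hnnb : n = nb
        · subst hnnb
          simp only [h.m_ng]
          refine ⟨by simp, ?_, ?_⟩
          · intro e he
            rcases List.mem_append.1 he with he | he
            · exact h2 e he
            · simp only [List.mem_singleton] at he
              subst he
              rcases hlevmem n hn with h' | h' <;> simp [h']
          · obtain ⟨e, he, hee⟩ := h3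
            exact ⟨e, List.mem_append_left _ he, hee⟩
        · simp only [if_neg hnnb]
          exact ⟨h1, h2, h3⟩
      · intro n hn
        have hne : n ≠ nb := by rintro rfl; rw [hn] at hc; exact Bool.false_ne_true hc
        rw [PySem.Dict.getD_modify]
        simp only [if_neg hne]
        exact h.m_fresh n hn
  · -- nb is new: enqueued by both, dist[nb] := L+1, prev[nb] := [(L, node)]
    have hcf : dist.contains nb = false := Bool.not_eq_true _ ▸ eq_false_of_ne_true hc
    have hvnb : nb ∉ vis := by
      rw [h.m_vis]
      intro hm
      rw [PySem.Dict.contains_eq_decide_mem_keys] at hcf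
      simp [hm] at hcf
    have hnbq : nb ∉ q := fun hm => hc (h.m_qmem nb hm)
    have hnbnode : nb ≠ node := by rintro rfl; exact hc h.m_ncon
    have hnbstart : nb ≠ start := by rintro rfl; exact hc h.m_scon
    simp only [aStep, bStep, hset, hcf, if_false, Bool.false_eq_true,
      List.mem_singleton, if_neg hnbstart, h.m_nd]
    refine ⟨trivial, ?_⟩
    have hgd : ∀ n, n ≠ nb → (dist.insert nb (L + 1)).getD n 0 = dist.getD n 0 := by
      intro n hne
      rw [PySem.Dict.getD_insert]
      simp [hne]
    have hgc : ∀ n, n ≠ nb → (dist.insert nb (L + 1)).contains n = dist.contains n := by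
      intro n hne
      rw [PySem.Dict.contains_insert]
      simp [hne]
    refine ⟨?_, ?_, ?_, ?_, ?_, ?_, h.m_ng, ?_, ?_, ?_, ?_⟩
    · rw [pv_set_add_of_not_mem vis nb hvnb, h.m_vis,
        PySem.Dict.keys_insert_of_not_contains dist _ hcf]
    · exact PySem.Dict.nodup_keys_insert dist nb (L + 1) h.m_dk
    · rw [hgc start hnbstart.symm]; exact h.m_scon
    · rw [hgd start hnbstart.symm]; exact h.m_sd
    · rw [hgc node hnbnode.symm]; exact h.m_ncon
    · rw [hgd node hnbnode.symm]; exact h.m_nd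
    · intro n hn
      rcases List.mem_append.1 hn with hmem | hmem
      · rw [hgc n (by rintro rfl; exact hnbq hmem)]; exact h.m_qmem n hmem
      · simp only [List.mem_singleton] at hmem
        rw [hmem]
        exact PySem.Dict.contains_insert_self dist nb (L + 1)
    · intro n hn hns
      rcases List.mem_append.1 hn with hmem | hmem
      · have hne : n ≠ nb := by rintro rfl; exact hnbq hmem
        obtain ⟨h1, h2, h3⟩ := h.m_qprev n hmem hns
        rw [PySem.Dict.getD_modify, if_neg hne, hgd n hne]
        exact ⟨h1, h2, h3⟩
      · simp only [List.mem_singleton] at hmem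
        rw [hmem, PySem.Dict.getD_modify, if_pos rfl, h.m_fresh nb hcf, h.m_ng,
          PySem.Dict.getD_insert_self]
        refine ⟨by simp, ?_, ⟨(L, node), by simp, by simp⟩⟩
        intro e he
        simp only [List.nil_append, List.mem_singleton] at he
        subst he
        simp
    · intro n hn
      have hne : n ≠ nb := by
        rintro rfl
        rw [PySem.Dict.contains_insert_self] at hn
        exact Bool.true_eq_false ▸ (by simp at hn)
      rw [PySem.Dict.getD_modify, if_neg hne]
      exact h.m_fresh n (by rw [← hgc n hne]; exact hn)
    · obtain ⟨a, b, hm⟩ := h.m_lev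
      refine ⟨a, b + 1, ?_⟩
      rw [List.map_append]
      have h1 : q.map (fun n => (dist.insert nb (L + 1)).getD n 0) =
          q.map (fun n => dist.getD n 0) := by
        apply List.map_congr_left
        intro n hn
        exact hgd n (by rintro rfl; exact hnbq hn)
      rw [h1, hm]
      simp only [List.map_cons, List.map_nil, PySem.Dict.getD_insert_self]
      rw [List.replicate_succ']
      simp [List.append_assoc]

-- the whole neighbour fold preserves the coupling
theorem pv_fold_pres (g : List (String × List String)) (start node : String) (L : Int)
    (l : List String) (q : List String) (vis : PySem.Set String)
    (prev : PySem.Dict String (List (Int × String)))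
    (ng : PySem.Dict String (Int × List String)) (dist : PySem.Dict String Int)
    (h : MidInv g start node L q vis prev ng dist) :
    (l.foldl (aStep node [start] ng) (q, vis, prev)).1 = (l.foldl (bStep node) (q, dist)).1 ∧
    MidInv g start node L (l.foldl (aStep node [start] ng) (q, vis, prev)).1
      (l.foldl (aStep node [start] ng) (q, vis, prev)).2.1
      (l.foldl (aStep node [start] ng) (q, vis, prev)).2.2 ng
      (l.foldl (bStep node) (q, dist)).2 := by
  induction l generalizing q vis prev dist with
  | nil => exact ⟨rfl, h⟩
  | cons nb t ih =>
      obtain ⟨h1, h2⟩ := pv_step_pres g start node L q vis prev ng dist nb h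
      simp only [List.foldl_cons]
      have h3 := ih (aStep node [start] ng (q, vis, prev) nb).1
        (aStep node [start] ng (q, vis, prev) nb).2.1
        (aStep node [start] ng (q, vis, prev) nb).2.2
        (bStep node (q, dist) nb).2 h2
      simp only [Prod.mk.eta] at h3
      rw [h1] at h3
      simpa only [Prod.mk.eta] using h3
      
-- the two loops agree under the invariant
theorem pv_main (g : List (String × List String)) (start : String)
    (fuel : Nat) (q : List String) (vis : PySem.Set String)
    (prev : PySem.Dict String (List (Int × String)))
    (ng : PySem.Dict String (Int × List String)) (dist : PySem.Dict String Int)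
    (h : BfsInv g start q vis prev ng dist) :
    aLoop g start fuel q vis prev [start] ng = bLoop g fuel q dist ng := by
  induction fuel generalizing q vis prev ng dist with
  | zero => rfl
  | succ fuel ih =>
    cases q with
    | nil => rfl
    | cons node q' =>
      have hnodemem : node ∈ node :: q' := List.mem_cons_self
      have hncon : dist.contains node = true := h.hq_mem node hnodemem
      -- A's heuristic (min over predecessors + 1) is exactly B's dist[node]
      have hng' :
          (if node ≠ start then
            ng.insert node
              (((PySem.List.min? ((prev.getD node []).map (fun e => e.1)) (fun x => x)).getD 0) + 1,
                (g.lookup node).getD [])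
          else ng) = ng.insert node (dist.getD node 0, (g.lookup node).getD []) := by
        by_cases hns : node = start
        · subst hns
          rw [if_neg (by simp), h.hs_d]
          exact (pv_insert_self_eq ng node (0, (g.lookup node).getD []) h.hng_nd h.hng_s).symm
        · rw [if_pos hns]
          obtain ⟨h1, h2, h3⟩ := h.hq_prev node hnodemem hns
          have hmem1 : (dist.getD node 0 - 1) ∈ (prev.getD node []).map (fun e => e.1) := by
            obtain ⟨e, he, hee⟩ := h3
            exact List.mem_map.2 ⟨e, he, hee⟩
          cases hm : PySem.List.min? ((prev.getD node []).map (fun e => e.1)) (fun x => x) with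
          | none =>
              rw [PySem.List.min?_eq_none_iff] at hm
              rw [hm] at hmem1
              simp at hmem1
          | some m =>
              have hle : m ≤ dist.getD node 0 - 1 := PySem.List.min?_isMin hm _ hmem1
              obtain ⟨e, he, hee⟩ := List.mem_map.1 (PySem.List.min?_mem hm)
              have hge := h2 e he
              rw [hee] at hge
              have hmv : m = dist.getD node 0 - 1 := le_antisymm hle hge
              have hv : (some m).getD 0 + 1 = dist.getD node 0 := by
                simp only [Option.getD_some]
                omega
              rw [hv]
      have hmid : MidInv g start node (dist.getD node 0) q' vis prev
          (ng.insert node (dist.getD node 0, (g.lookup node).getD [])) dist := by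
        refine ⟨h.hvis, h.hdk, h.hs_con, h.hs_d, hncon, rfl, ?_,
          (fun n hn => h.hq_mem n (List.mem_cons_of_mem _ hn)),
          (fun n hn => h.hq_prev n (List.mem_cons_of_mem _ hn)), h.hfresh, ?_⟩
        · rw [PySem.Dict.getD_insert_self]
        · obtain ⟨L0, a, b, hm⟩ := h.hlev
          simp only [List.map_cons] at hm
          cases a with
          | zero =>
              cases b with
              | zero => simp at hm
              | succ b =>
                  rw [List.replicate_zero, List.nil_append, List.replicate_succ] at hm
                  obtain ⟨hL1, hm2⟩ := List.cons_eq_cons.1 hm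
                  refine ⟨b, 0, ?_⟩
                  rw [hm2, hL1]
                  simp
          | succ a =>
              rw [List.replicate_succ, List.cons_append] at hm
              obtain ⟨hL1, hm2⟩ := List.cons_eq_cons.1 hm
              refine ⟨a, b, ?_⟩
              rw [hm2, hL1]
      obtain ⟨hq_eq, hmid'⟩ := pv_fold_pres g start node (dist.getD node 0)
        ((g.lookup node).getD []) q' vis prev
        (ng.insert node (dist.getD node 0, (g.lookup node).getD [])) dist hmid
      have hinv' : BfsInv g start
          (((g.lookup node).getD []).foldl
            (aStep node [start] (ng.insert node (dist.getD node 0, (g.lookup node).getD [])))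
            (q', vis, prev)).1
          (((g.lookup node).getD []).foldl
            (aStep node [start] (ng.insert node (dist.getD node 0, (g.lookup node).getD [])))
            (q', vis, prev)).2.1
          (((g.lookup node).getD []).foldl
            (aStep node [start] (ng.insert node (dist.getD node 0, (g.lookup node).getD [])))
            (q', vis, prev)).2.2
          (ng.insert node (dist.getD node 0, (g.lookup node).getD []))
          (((g.lookup node).getD []).foldl (bStep node) (q', dist)).2 := by
        refine ⟨hmid'.m_vis, hmid'.m_dk, hmid'.m_scon, hmid'.m_sd, ?_,
          PySem.Dict.nodup_keys_insert _ _ _ h.hng_nd,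
          hmid'.m_qmem, hmid'.m_qprev, hmid'.m_fresh, ⟨_, hmid'.m_lev⟩⟩
        by_cases hns : node = start
        · subst hns
          rw [h.hs_d, pv_insert_self_eq ng node (0, (g.lookup node).getD []) h.hng_nd h.hng_s]
          exact h.hng_s
        · rw [PySem.Dict.get?_insert, if_neg (fun hh => hns hh.symm)]
          exact h.hng_s
      simp only [aLoop, bLoop]
      rw [hng', hq_eq]
      rw [hq_eq] at hinv'
      exact ih _ _ _ _ _ hinv'

-- ===== VERDICT (by name: the statement is the Claim_ definition above) =====
theorem get_undirected_graph_spec : Claim_equal_get_undirected_graph := by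
  unfold Claim_equal_get_undirected_graph
  intro graph start _ _
  unfold Spec_get_undirected_graph
  cases hl : graph.lookup start with
  | none => simp only [get_undirected_graph, get_undirected_graph_alt, hl]
  | some ns =>
      simp only [get_undirected_graph, get_undirected_graph_alt, hl]
      congr 1
      apply pv_main
      refine ⟨?_, ?_, ?_, ?_, ?_, ?_, ?_, ?_, ?_, ?_⟩
      · rw [pv_set_add_of_not_mem _ _ (by simp [PySem.Set.empty]),
          PySem.Dict.keys_insert_of_not_contains _ _ (by simp)]
        simp [PySem.Set.empty]
      · exact PySem.Dict.nodup_keys_insert _ _ _ (by simp)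
      · exact PySem.Dict.contains_insert_self _ _ _
      · exact PySem.Dict.getD_insert_self _ _ _ _
      · rw [PySem.Dict.get?_insert_self, hl]
        simp
      · exact PySem.Dict.nodup_keys_insert _ _ _ (by simp)
      · intro n hn
        simp only [List.mem_singleton] at hn
        rw [hn]
        exact PySem.Dict.contains_insert_self _ _ _
      · intro n hn hns
        simp only [List.mem_singleton] at hn
        exact absurd hn hns
      · intro n _
        simp [PySem.Dict.getD_empty]
      · exact ⟨0, 1, 0, by simp [PySem.Dict.getD_insert_self]⟩
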